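-- pv_equiv track=rewrite | github.com/darrylys/datacamp | machinelearningbasic/learningfromdata/commons.py | getDsLbl
-- ===== SOURCE A (Python) =====
-- def getDsLbl(pX, py, label):
--     x = []
--     y = []
--
--     for xn,yn in zip(pX, py):
--         if yn == label:
--             x.append(xn[0])
--             y.append(xn[1])
--
--     return x, y
-- ===== SOURCE B (Python) =====
-- def getDsLbl(pX, py, label):
--     # Divide and conquer: split the paired data in half, solve each half,
--     # concatenate. Correct since filtering distributes over concatenation.
--     pairs = list(zip(pX, py))
--
--     def go(lo, hi):
--         if hi - lo == 0:
--             return [], []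
--         if hi - lo == 1:
--             xn, yn = pairs[lo]
--             return ([xn[0]], [xn[1]]) if yn == label else ([], [])
--         mid = (lo + hi) // 2
--         lx, ly = go(lo, mid)
--         rx, ry = go(mid, hi)
--         return lx + rx, ly + ry
--
--     return go(0, len(pairs))
-- ===== Notes on version B (the rewrite author's own statement) =====
-- stated objective: alternative
-- what changed: Replaced A's single forward loop appending to two mutable accumulators by a divide-and-conquer recursion that splits the zipped data in half, solves each half, and concatenates the results (valid because filtering distributes over concatenation).
import Mathlib
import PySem

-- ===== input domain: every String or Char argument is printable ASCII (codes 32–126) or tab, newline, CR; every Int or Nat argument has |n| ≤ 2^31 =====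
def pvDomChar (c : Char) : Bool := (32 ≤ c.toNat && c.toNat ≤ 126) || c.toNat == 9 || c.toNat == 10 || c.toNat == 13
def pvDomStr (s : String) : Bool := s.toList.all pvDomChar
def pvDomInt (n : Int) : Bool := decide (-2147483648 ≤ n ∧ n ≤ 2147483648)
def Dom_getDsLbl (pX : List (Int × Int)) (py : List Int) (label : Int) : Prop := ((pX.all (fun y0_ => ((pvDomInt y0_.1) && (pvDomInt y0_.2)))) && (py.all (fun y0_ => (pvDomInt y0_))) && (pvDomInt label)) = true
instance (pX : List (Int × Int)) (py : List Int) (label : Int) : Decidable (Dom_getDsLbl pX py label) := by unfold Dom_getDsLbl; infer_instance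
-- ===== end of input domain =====

-- ===== PORT A =====
-- B replaces A's single append loop by a divide-and-conquer recursion over the zipped pairs; no speed claim.
def getDsLbl (pX : List (Int × Int)) (py : List Int) (label : Int) : List Int × List Int :=
  (List.zip pX py).foldl
    (fun (acc : List Int × List Int) xy =>
      if xy.2 == label then (acc.1 ++ [xy.1.1], acc.2 ++ [xy.1.2]) else acc)
    ([], [])

-- ===== PORT B =====
-- go lo hi: divide-and-conquer over pairs[lo:hi], as in Source B (pairs[lo] is in range whenever called).
def pvGo (pairs : List ((Int × Int) × Int)) (label : Int) (lo hi : Nat) : List Int × List Int :=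
  if hi - lo = 0 then ([], [])
  else if hi - lo = 1 then
    let p := pairs.getD lo ((0, 0), 0)
    if p.2 == label then ([p.1.1], [p.1.2]) else ([], [])
  else
    let mid := (lo + hi) / 2
    let l := pvGo pairs label lo mid
    let r := pvGo pairs label mid hi
    (l.1 ++ r.1, l.2 ++ r.2)
termination_by hi - lo
decreasing_by all_goals omega

def getDsLbl_alt (pX : List (Int × Int)) (py : List Int) (label : Int) : List Int × List Int :=
  let pairs := List.zip pX py
  pvGo pairs label 0 pairs.length

-- ===== PRECONDITION & SPEC =====
def Spec_getDsLbl (pX : List (Int × Int)) (py : List Int) (label : Int) (out : List Int × List Int) : Prop := out = getDsLbl_alt pX py label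
instance (pX : List (Int × Int)) (py : List Int) (label : Int) (out : List Int × List Int) : Decidable (Spec_getDsLbl pX py label out) := by unfold Spec_getDsLbl; infer_instance

-- ===== CLAIM =====
def Claim_equal_getDsLbl : Prop := ∀ (pX : List (Int × Int)) (py : List Int) (label : Int), Dom_getDsLbl pX py label → Spec_getDsLbl pX py label (getDsLbl pX py label)

-- ===== LEMMAS AND PROOFS =====

-- closed form both sides reach
def pvF (label : Int) (l : List ((Int × Int) × Int)) : List Int × List Int :=
  ((l.filter (fun xy => xy.2 == label)).map (fun xy => xy.1.1),
   (l.filter (fun xy => xy.2 == label)).map (fun xy => xy.1.2))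

theorem pvF_append (label : Int) (a b : List ((Int × Int) × Int)) :
    pvF label (a ++ b) = ((pvF label a).1 ++ (pvF label b).1, (pvF label a).2 ++ (pvF label b).2) := by
  simp [pvF]

theorem pvFold_char (l : List ((Int × Int) × Int)) (label : Int) (a b : List Int) :
    l.foldl (fun (acc : List Int × List Int) xy =>
      if xy.2 == label then (acc.1 ++ [xy.1.1], acc.2 ++ [xy.1.2]) else acc) (a, b)
    = (a ++ (pvF label l).1, b ++ (pvF label l).2) := by
  induction l generalizing a b with
  | nil => simp [pvF]
  | cons h t ih =>
    by_cases hc : h.2 == label <;>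
      simp only [List.foldl_cons, pvF, List.filter_cons, hc, if_pos, if_neg, ih,
        List.map_cons, List.append_assoc, List.singleton_append,
        Bool.false_eq_true, not_false_iff]

theorem pvGo_char (pairs : List ((Int × Int) × Int)) (label : Int) :
    ∀ n lo hi, hi - lo = n → hi ≤ pairs.length →
      pvGo pairs label lo hi = pvF label ((pairs.drop lo).take (hi - lo)) := by
  intro n
  induction n using Nat.strong_induction_on with
  | _ n ih =>
    intro lo hi hn hle
    rw [pvGo]
    by_cases h0 : hi - lo = 0
    · simp [h0, pvF]
    · by_cases h1 : hi - lo = 1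
      · have hlt : lo < pairs.length := by omega
        have hgetD : pairs.getD lo ((0, 0), 0) = pairs[lo] := by
          simp [List.getD, List.getElem?_eq_getElem hlt]
        have hdrop : (pairs.drop lo).take (hi - lo) = [pairs[lo]] := by
          rw [h1, List.drop_eq_getElem_cons hlt, List.take_succ_cons, List.take_zero]
        rw [hdrop]
        simp only [h0, h1, if_false, if_true, hgetD, reduceIte]
        by_cases hc : pairs[lo].2 == label <;> simp [pvF, hc]
      · simp only [h0, h1, if_false, reduceIte]
        have hmidl : lo < (lo + hi) / 2 := by omega
        have hmidh : (lo + hi) / 2 < hi := by omega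
        rw [ih ((lo + hi) / 2 - lo) (by omega) lo ((lo + hi) / 2) rfl (by omega),
            ih (hi - (lo + hi) / 2) (by omega) ((lo + hi) / 2) hi rfl hle]
        have hsum : hi - lo = ((lo + hi) / 2 - lo) + (hi - (lo + hi) / 2) := by omega
        have hsplit : (pairs.drop lo).take (hi - lo)
            = (pairs.drop lo).take ((lo + hi) / 2 - lo)
              ++ (pairs.drop ((lo + hi) / 2)).take (hi - (lo + hi) / 2) := by
          rw [hsum, List.take_add, List.drop_drop]
          have : lo + ((lo + hi) / 2 - lo) = (lo + hi) / 2 := by omega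
          rw [this]
        rw [hsplit, pvF_append]

-- ===== VERDICT =====
theorem getDsLbl_spec : Claim_equal_getDsLbl := by
  intro pX py label _
  show _ = _
  simp only [getDsLbl, getDsLbl_alt]
  rw [pvFold_char, pvGo_char (List.zip pX py) label (List.zip pX py).length 0 _ rfl le_rfl]
  simp only [Nat.sub_zero, List.drop_zero, List.take_length, List.nil_append]
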